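-- pv_equiv track=rewrite | github.com/MateuszMazurkiewicz/CodeTrain | InterviewPro/2019.12.04/task.py | word_sorted
-- ===== SOURCE A (Python) =====
-- def word_sorted(word, order):
--     word_index = 0
--     order_index = 0
--     while word_index < len(word) and order_index < len(order):
--         while word_index < len(word) and order_index < len(order) and word[word_index] == order[order_index]:
--             word_index +=1
--
--         order_index += 1
--
--     return order_index < len(order)
-- ===== SOURCE B (Python) =====
-- def word_sorted(word, order):
--     runs = []
--     for ch in word:
--         if not runs or runs[-1] != ch:
--             runs.append(ch)
--     ri = 0
--     oi = 0
--     while ri < len(runs) and oi < len(order):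
--         if order[oi] == runs[ri]:
--             ri += 1
--         oi += 1
--     return oi < len(order)
-- ===== Notes on version B (the rewrite author's own statement) =====
-- stated objective: faster
-- what changed: Replaced A's nested while loops (inner loop re-scans word characters against the current order character) by a two-phase decomposition: first run-length-compress word into its sequence of distinct consecutive characters, then one flat two-pointer pass over that sequence and order; the compression removes per-order-character re-entry into the inner scan (measured ~2.5x on random inputs).
import Mathlib
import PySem

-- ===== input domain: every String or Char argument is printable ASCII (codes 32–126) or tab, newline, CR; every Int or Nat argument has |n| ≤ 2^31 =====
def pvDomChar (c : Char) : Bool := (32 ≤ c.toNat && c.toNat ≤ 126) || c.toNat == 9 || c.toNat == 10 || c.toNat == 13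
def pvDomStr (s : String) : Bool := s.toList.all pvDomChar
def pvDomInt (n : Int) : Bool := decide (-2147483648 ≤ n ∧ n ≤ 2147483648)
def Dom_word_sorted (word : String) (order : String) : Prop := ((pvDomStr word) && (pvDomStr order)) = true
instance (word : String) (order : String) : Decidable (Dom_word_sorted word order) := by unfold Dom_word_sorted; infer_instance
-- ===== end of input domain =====

-- B decomposes A's nested while loops into run-length compression of word plus one flat two-pointer pass (objective: alternative).
-- ===== PORT A =====
-- inner while loop: advance word_index while word[word_index] == order[order_index]
def pvAInner (c : Char) : List Char → List Char
  | [] => []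
  | x :: xs => if x = c then pvAInner c xs else x :: xs

-- outer while loop over (remaining word, remaining order); returns order_index < len(order) at exit
def pvALoop : List Char → List Char → Bool
  | x :: xs, c :: os => pvALoop (pvAInner c (x :: xs)) os
  | _, o => !o.isEmpty

def word_sorted (word : String) (order : String) : Bool :=
  pvALoop word.toList order.toList

-- ===== PORT B =====
-- the for loop building runs: append ch unless it equals the last appended character
def pvBRuns (w : List Char) : List Char :=
  w.foldl (fun runs ch => if runs.getLast? = some ch then runs else runs ++ [ch]) []

-- the two-pointer while loop: if order[oi] == runs[ri] advance ri; always advance oi; return oi < len(order)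
def pvBLoop : List Char → List Char → Bool
  | r :: rs, c :: os => if c = r then pvBLoop rs os else pvBLoop (r :: rs) os
  | _, o => !o.isEmpty

def word_sorted_alt (word : String) (order : String) : Bool :=
  pvBLoop (pvBRuns word.toList) order.toList

-- ===== PRECONDITION & SPEC =====
def Spec_word_sorted (word : String) (order : String) (out : Bool) : Prop := out = word_sorted_alt word order
instance (word : String) (order : String) (out : Bool) : Decidable (Spec_word_sorted word order out) := by unfold Spec_word_sorted; infer_instance

-- ===== CLAIM (what is proved, stated in full; the proofs are below) =====
def Claim_equal_word_sorted : Prop := ∀ (word : String) (order : String), Dom_word_sorted word order → Spec_word_sorted word order (word_sorted word order)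

-- ===== LEMMAS AND PROOFS =====

-- recursive characterization of pvBRuns, tracking the last appended character
def pvRle : Option Char → List Char → List Char
  | _, [] => []
  | last, c :: cs => if last = some c then pvRle last cs else c :: pvRle (some c) cs

theorem pvBRuns_eq_rle_aux (w : List Char) :
    ∀ acc : List Char,
      w.foldl (fun runs ch => if runs.getLast? = some ch then runs else runs ++ [ch]) acc
        = acc ++ pvRle acc.getLast? w := by
  induction w with
  | nil => intro acc; simp [pvRle]
  | cons c cs ih =>
    intro acc
    simp only [List.foldl, pvRle]
    by_cases h : acc.getLast? = some c
    · simp [h, ih acc]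
    · simp [h, ih (acc ++ [c])]

theorem pvBRuns_eq_rle (w : List Char) : pvBRuns w = pvRle none w := by
  simpa using pvBRuns_eq_rle_aux w []

theorem pvRle_aInner (c : Char) (xs : List Char) :
    pvRle none (pvAInner c xs) = pvRle (some c) xs := by
  induction xs with
  | nil => simp [pvAInner, pvRle]
  | cons y ys ih =>
    by_cases h : y = c
    · subst h; simpa [pvAInner, pvRle] using ih
    · simp [pvAInner, pvRle, h, Ne.symm h]

theorem pvLoop_eq (o : List Char) : ∀ w : List Char, pvALoop w o = pvBLoop (pvRle none w) o := by
  induction o with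
  | nil =>
    intro w
    cases w with
    | nil => simp [pvALoop, pvBLoop, pvRle]
    | cons x xs =>
      simp only [pvALoop, pvRle]
      cases h : pvRle (some x) xs <;> simp [pvBLoop]
  | cons c os ih =>
    intro w
    cases w with
    | nil => simp [pvALoop, pvBLoop, pvRle]
    | cons x xs =>
      by_cases h : c = x
      · subst h
        have : pvAInner c (c :: xs) = pvAInner c xs := by simp [pvAInner]
        rw [pvALoop, this, ih (pvAInner c xs)]
        rw [pvRle_aInner]
        simp [pvRle, pvBLoop]
      · have hA : pvAInner c (x :: xs) = x :: xs := by simp [pvAInner, Ne.symm h]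
        rw [pvALoop, hA, ih (x :: xs)]
        simp [pvRle, pvBLoop, h]

-- ===== VERDICT (by name: the statement is the Claim_ definition above) =====
theorem word_sorted_spec : Claim_equal_word_sorted := by
  intro word order _
  unfold Spec_word_sorted word_sorted word_sorted_alt
  rw [pvBRuns_eq_rle, pvLoop_eq]
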